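-- pv_equiv track=rewrite | github.com/kazukinagata/waggle | skills/setting-up-scrum/scripts/calc-complexity.py | calculate
-- ===== SOURCE A (Python) =====
-- def count_tokens_approx(text: str) -> int:
--     """Rough token count: ~4 chars per token."""
--     return max(1, len(text) // 4)
--
-- def calculate(acceptance_criteria: str, description: str, blocked_by_depth: int = 0) -> int:
--     ac_lines = [l for l in acceptance_criteria.strip().splitlines() if l.strip()]
--     ac_points = len(ac_lines) * 2
--
--     desc_tokens = count_tokens_approx(description)
--     desc_points = desc_tokens // 200
--
--     depth_points = blocked_by_depth * 2
--
--     raw = ac_points + desc_points + depth_points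
--     raw = max(1, raw)
--
--     # Snap to Fibonacci-like scale: 1, 2, 3, 5, 8, 13
--     fib = [1, 2, 3, 5, 8, 13]
--     score = min(fib, key=lambda x: abs(x - raw))
--     return score
-- ===== SOURCE B (Python) =====
-- def calculate(acceptance_criteria: str, description: str, blocked_by_depth: int = 0) -> int:
--     ac_lines = [l for l in acceptance_criteria.strip().splitlines() if l.strip()]
--     raw = max(1, len(ac_lines) * 2 + max(1, len(description) // 4) // 200 + blocked_by_depth * 2)
--     # closed-form snap to the Fibonacci scale 1,2,3,5,8,13 (ties go to the smaller value)
--     if raw <= 1: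
--         return 1
--     if raw == 2:
--         return 2
--     if raw <= 4:
--         return 3
--     if raw <= 6:
--         return 5
--     if raw <= 10:
--         return 8
--     return 13
-- ===== Notes on version B (the rewrite author's own statement) =====
-- stated objective: simpler
-- what changed: The raw-score arithmetic is kept, but the min(fib, key=abs(x-raw)) nearest-value scan over the Fibonacci list is replaced by a closed-form threshold ladder that returns the snapped value directly.
import Mathlib
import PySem

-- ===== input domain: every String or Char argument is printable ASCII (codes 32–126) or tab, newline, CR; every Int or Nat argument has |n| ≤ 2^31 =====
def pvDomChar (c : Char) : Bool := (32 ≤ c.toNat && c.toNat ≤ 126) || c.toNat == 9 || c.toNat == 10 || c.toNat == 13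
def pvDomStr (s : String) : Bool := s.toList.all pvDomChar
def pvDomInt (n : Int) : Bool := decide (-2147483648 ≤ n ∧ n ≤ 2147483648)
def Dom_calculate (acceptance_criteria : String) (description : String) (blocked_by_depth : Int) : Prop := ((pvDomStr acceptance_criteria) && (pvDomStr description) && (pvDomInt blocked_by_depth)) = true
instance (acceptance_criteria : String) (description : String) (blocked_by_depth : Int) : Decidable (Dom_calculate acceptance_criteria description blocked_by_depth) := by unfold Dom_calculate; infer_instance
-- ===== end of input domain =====

-- B replaces A's min-over-list nearest-Fibonacci scan with a closed-form threshold ladder (objective: simpler).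

-- ===== PORT A =====
def count_tokens_approx (text : String) : Int :=
  max 1 (PySem.Int.floordiv (PySem.Str.len text) 4)

def calculate (acceptance_criteria : String) (description : String) (blocked_by_depth : Int) : Int :=
  let ac_lines := (PySem.Str.splitlines (PySem.Str.strip acceptance_criteria)).filter
    (fun l => !(PySem.Str.strip l == ""))
  let ac_points : Int := (ac_lines.length : Int) * 2
  let desc_tokens : Int := count_tokens_approx description
  let desc_points : Int := PySem.Int.floordiv desc_tokens 200
  let depth_points : Int := blocked_by_depth * 2
  let raw : Int := max 1 (ac_points + desc_points + depth_points)
  let fib : List Int := [1, 2, 3, 5, 8, 13]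
  -- min(fib, key=…): fib is a nonempty literal, so Python's min cannot raise; getD 0 is never the default
  (PySem.List.min? fib (fun x => |x - raw|)).getD 0

-- ===== PORT B =====
def calculate_alt (acceptance_criteria : String) (description : String) (blocked_by_depth : Int) : Int :=
  let ac_lines := (PySem.Str.splitlines (PySem.Str.strip acceptance_criteria)).filter
    (fun l => !(PySem.Str.strip l == ""))
  let raw : Int := max 1 ((ac_lines.length : Int) * 2
      + PySem.Int.floordiv (max 1 (PySem.Int.floordiv (PySem.Str.len description) 4)) 200
      + blocked_by_depth * 2)
  if raw ≤ 1 then 1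
  else if raw = 2 then 2
  else if raw ≤ 4 then 3
  else if raw ≤ 6 then 5
  else if raw ≤ 10 then 8
  else 13

-- ===== PRECONDITION & SPEC =====
def Spec_calculate (acceptance_criteria : String) (description : String) (blocked_by_depth : Int) (out : Int) : Prop := out = calculate_alt acceptance_criteria description blocked_by_depth
instance (acceptance_criteria : String) (description : String) (blocked_by_depth : Int) (out : Int) : Decidable (Spec_calculate acceptance_criteria description blocked_by_depth out) := by unfold Spec_calculate; infer_instance

-- ===== CLAIM (what is proved, stated in full; the proofs are below) =====
def Claim_equal_calculate : Prop := ∀ (acceptance_criteria : String) (description : String) (blocked_by_depth : Int), Dom_calculate acceptance_criteria description blocked_by_depth → Spec_calculate acceptance_criteria description blocked_by_depth (calculate acceptance_criteria description blocked_by_depth)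

-- ===== LEMMAS AND PROOFS =====

-- the nearest-Fibonacci scan agrees with the threshold ladder for every r ≥ 1
theorem snap_eq (r : Int) (hr : 1 ≤ r) :
    (PySem.List.min? [1, 2, 3, 5, 8, 13] (fun x => |x - r|)).getD 0 =
      if r ≤ 1 then 1
      else if r = 2 then 2
      else if r ≤ 4 then 3
      else if r ≤ 6 then 5
      else if r ≤ 10 then 8
      else 13 := by
  by_cases h : r ≤ 10
  · interval_cases r <;> decide
  · have h2 : |(2 : Int) - r| < |(1 : Int) - r| := by
      rw [abs_of_nonpos (by omega), abs_of_nonpos (by omega)]; omega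
    have h3 : |(3 : Int) - r| < |(2 : Int) - r| := by
      rw [abs_of_nonpos (by omega), abs_of_nonpos (by omega)]; omega
    have h5 : |(5 : Int) - r| < |(3 : Int) - r| := by
      rw [abs_of_nonpos (by omega), abs_of_nonpos (by omega)]; omega
    have h8 : |(8 : Int) - r| < |(5 : Int) - r| := by
      rw [abs_of_nonpos (by omega), abs_of_nonpos (by omega)]; omega
    have h13 : |(13 : Int) - r| < |(8 : Int) - r| := by
      rw [abs_of_nonpos (show (8 : Int) - r ≤ 0 by omega)]
      rcases abs_cases ((13 : Int) - r) with ⟨h, _⟩ | ⟨h, _⟩ <;> omega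
    simp only [PySem.List.min?, List.foldl, if_pos h2, if_pos h3, if_pos h5, if_pos h8,
      if_pos h13, Option.getD_some]
    split_ifs <;> omega

-- ===== VERDICT (by name: the statement is the Claim_ definition above) =====
theorem calculate_spec : Claim_equal_calculate := by
  intro ac d dep _
  unfold Spec_calculate calculate calculate_alt count_tokens_approx
  exact snap_eq _ (le_max_left _ _)
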